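-- pv_equiv track=rewrite | github.com/Mins00oo/PythonStudy_CT | Programmers/Lv1/과일 장수.py | solution
-- ===== SOURCE A (Python) =====
-- def solution(k, m, score):
--     answer = 0
--     # 내림차순 정렬
--     score.sort(reverse=True)
--     for i in range(0, len(score), m):
--         # m개만큼의 tmp 생성
--         tmp = score[i:i + m]
--         # tmp의 길이가 담기는 과일 개수인 m과 같으면 answer에 추가
--         if len(tmp) == m:
--             answer += min(tmp) * m
--     return answer
-- ===== SOURCE B (Python) =====
-- def solution(k, m, score):
--     if m <= 0:
--         return 0
--     counts = {}
--     for s in score: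
--         counts[s] = counts.get(s, 0) + 1
--     total = 0
--     carry = 0
--     for v in sorted(counts, reverse=True):
--         c = counts[v] + carry
--         total += (c // m) * m * v
--         carry = c % m
--     return total
-- ===== Notes on version B (the rewrite author's own statement) =====
-- stated objective: alternative
-- what changed: A sorts the whole list descending and scans each m-sized slice for its min; B never sorts the elements: it builds a dict of value counts, walks the distinct values in descending order and uses carry arithmetic (c//m full boxes per value, c%m carried on) so no slice or min scan exists.
-- crash fix: When m = 0, A's range(0, len(score), 0) raises ValueError; B returns 0. — e.g. on solution(1, 0, [3, 1]): A raises ValueError, B returns 0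
import Mathlib
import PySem

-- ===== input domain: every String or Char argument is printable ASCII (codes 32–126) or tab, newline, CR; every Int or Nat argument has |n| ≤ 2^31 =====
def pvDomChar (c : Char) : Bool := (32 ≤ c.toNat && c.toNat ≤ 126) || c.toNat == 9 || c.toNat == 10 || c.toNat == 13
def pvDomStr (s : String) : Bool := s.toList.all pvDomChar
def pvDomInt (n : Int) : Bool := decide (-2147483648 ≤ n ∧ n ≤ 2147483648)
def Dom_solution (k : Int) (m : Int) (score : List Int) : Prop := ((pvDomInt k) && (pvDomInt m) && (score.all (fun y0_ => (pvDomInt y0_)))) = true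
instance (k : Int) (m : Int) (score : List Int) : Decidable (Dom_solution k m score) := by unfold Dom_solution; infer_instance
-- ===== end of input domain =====

-- B replaces A's sort-and-slice-min scan by a dict of value counts walked in descending
-- order of DISTINCT values with carry arithmetic (objective: alternative; A sorts `score`
-- in place — equivalence is about the return value only, B does not mutate).


-- ===== PORT A =====
-- literal port of A: sort descending, scan the groups score[i:i+m] for i in range(0, len, m),
-- add min(group) * m for each full group.  (min(tmp) is guarded by len(tmp) == m in A, so the
-- .getD 0 totalisation of min? is never the value used on inputs A returns on.)
def solution (k : Int) (m : Int) (score : List Int) : Int :=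
  let s := PySem.List.sorted score (fun x => x) true
  (PySem.List.pyRange 0 (PySem.List.len s) m).foldl
    (fun answer i =>
      let tmp := PySem.List.slice s (some i) (some (i + m))
      if PySem.List.len tmp = m then
        answer + (PySem.List.min? tmp (fun x => x)).getD 0 * m
      else answer) 0

-- ===== PORT B =====
-- port of B: count each value into a dict, then walk the distinct values in descending
-- order keeping (total, carry): c = count+carry fruits at value ≥ v fill c//m boxes whose
-- min is v, and c%m fruits are carried to the next (smaller) value.
def solution_alt (k : Int) (m : Int) (score : List Int) : Int :=
  if m ≤ 0 then 0
  else
    let counts := score.foldl (fun d s => d.insert s (d.getD s 0 + 1)) PySem.Dict.empty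
    ((PySem.List.sorted counts.keys (fun x => x) true).foldl
      (fun (st : Int × Int) v =>
        let c := counts.getD v 0 + st.2
        (st.1 + PySem.Int.floordiv c m * m * v, PySem.Int.mod c m)) ((0 : Int), (0 : Int))).1

-- ===== PRECONDITION & SPEC =====
-- Pre_ excludes only m = 0, on which A's range(0, len, 0) raises ValueError (B returns 0 there,
-- stated checkably in Raises_solution below).
def Pre_solution (k : Int) (m : Int) (score : List Int) : Prop := m ≠ 0
instance (k : Int) (m : Int) (score : List Int) : Decidable (Pre_solution k m score) := by unfold Pre_solution; infer_instance
def pvWitness_solution : Int × Int × List Int := (4, 2, [4, 1, 2, 4, 2, 1])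

-- A raises ValueError (zero step in range) exactly when m = 0; B returns 0 there.
def Raises_solution (k : Int) (m : Int) (score : List Int) : Prop := m = 0
instance (k : Int) (m : Int) (score : List Int) : Decidable (Raises_solution k m score) := by unfold Raises_solution; infer_instance
def pvRaiseWitness_solution : Int × Int × List Int := (1, 0, [3, 1])
def pvRaiseWitnessOut_solution : Int := 0

def Spec_solution (k : Int) (m : Int) (score : List Int) (out : Int) : Prop := out = solution_alt k m score
instance (k : Int) (m : Int) (score : List Int) (out : Int) : Decidable (Spec_solution k m score out) := by unfold Spec_solution; infer_instance

-- ===== CLAIM (what is proved, stated in full; the proofs are below) =====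
def Claim_equal_solution : Prop := ∀ (k : Int) (m : Int) (score : List Int), Dom_solution k m score → Pre_solution k m score → Spec_solution k m score (solution k m score)
def Claim_raises_solution : Prop := (∀ (k : Int) (m : Int) (score : List Int), Dom_solution k m score → Raises_solution k m score → ¬ Pre_solution k m score) ∧ (Dom_solution (pvRaiseWitness_solution.1) (pvRaiseWitness_solution.2.1) (pvRaiseWitness_solution.2.2) ∧ Raises_solution (pvRaiseWitness_solution.1) (pvRaiseWitness_solution.2.1) (pvRaiseWitness_solution.2.2) ∧ solution_alt (pvRaiseWitness_solution.1) (pvRaiseWitness_solution.2.1) (pvRaiseWitness_solution.2.2) = pvRaiseWitnessOut_solution)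

-- ===== LEMMAS AND PROOFS =====

-- the per-element view of B's carry walk: one fruit of value x arrives; a full box closes iff
-- the carry reaches M (proof-only device linking B's per-distinct-value steps to A's chunks)
def perStep (M : Int) (st : Int × Int) (x : Int) : Int × Int :=
  (st.1 + PySem.Int.floordiv (st.2 + 1) M * M * x, PySem.Int.mod (st.2 + 1) M)

-- range(0, n, m) is empty for a negative step and nonnegative stop
theorem pyRange_neg_step_nil (n m : Int) (hn : 0 ≤ n) (hm : m < 0) :
    PySem.List.pyRange 0 n m = [] := by
  simp only [PySem.List.pyRange]
  have h1 : ¬ m = 0 := by omega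
  have h2 : ¬ 0 < m := by omega
  have h3 : ¬ n < 0 := by omega
  simp [h1, h2, h3]

-- a fold that conditionally accumulates is the sum of the if-terms
theorem foldl_if_add {β : Type} (l : List β) (p : β → Prop) [DecidablePred p]
    (g : β → Int) (a : Int) :
    l.foldl (fun acc x => if p x then acc + g x else acc) a
      = a + (l.map (fun x => if p x then g x else 0)).sum := by
  have h1 := PySem.List.foldl_congr_mem (l := l) (init := a)
    (f := fun acc x => if p x then acc + g x else acc)
    (g := fun acc x => acc + if p x then g x else 0)
    (by intro acc x _; dsimp only; split <;> simp)
  rw [h1]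
  exact PySem.List.foldl_add l _ a

-- a list sum over List.range is the Finset.range sum
theorem sum_map_range (n : Nat) (f : Nat → Int) :
    ((List.range n).map f).sum = ∑ i ∈ Finset.range n, f i := rfl

-- minimum value of a full descending chunk: min((a.reverse.drop i).take M) = a[n - (i+M)]
theorem min_chunk (a : List Int)
    (hmono : ∀ p q : Nat, p ≤ q → q < a.length → a.getD p 0 ≤ a.getD q 0)
    (i M : Nat) (hM : 0 < M) (hle : i + M ≤ a.length) :
    (PySem.List.min? ((a.reverse.drop i).take M) (fun x => x)).getD 0
      = a.getD (a.length - (i + M)) 0 := by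
  set n := a.length with hn
  set tmp := (a.reverse.drop i).take M with htmp
  have hlen : tmp.length = M := by
    simp [htmp]; omega
  have hget : ∀ (j : Nat) (hj : j < tmp.length), tmp[j] = a.getD (n - 1 - (i + j)) 0 := by
    intro j hj
    have hj' : j < M := by omega
    have hij : i + j < n := by omega
    have h1 : tmp[j] = a.reverse[i + j]'(by simp; omega) := by
      simp only [htmp, List.getElem_take, List.getElem_drop]
    rw [h1, List.getElem_reverse]
    rw [List.getD_eq_getElem a 0 (by omega)]
  have hvmem : a.getD (n - (i + M)) 0 ∈ tmp := by
    have hlast : M - 1 < tmp.length := by omega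
    have h2 := hget (M - 1) hlast
    have harith : n - 1 - (i + (M - 1)) = n - (i + M) := by omega
    rw [harith] at h2
    rw [← h2]; exact List.getElem_mem hlast
  have hmin : ∀ y ∈ tmp, a.getD (n - (i + M)) 0 ≤ y := by
    intro y hy
    obtain ⟨j, hj, hje⟩ := List.mem_iff_getElem.mp hy
    rw [← hje, hget j hj]
    exact hmono _ _ (by omega) (by omega)
  cases hm : PySem.List.min? tmp (fun x => x) with
  | none =>
      exfalso
      have h3 := (PySem.List.min?_eq_none_iff tmp (fun x => x)).mp hm
      rw [h3] at hlen; simp at hlen; omega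
  | some w =>
      simp only [Option.getD_some]
      have h1 : w ≤ a.getD (n - (i + M)) 0 := PySem.List.min?_isMin hm _ hvmem
      have h2 : a.getD (n - (i + M)) 0 ≤ w := hmin w (PySem.List.min?_mem hm)
      omega

-- the descending sort is the reverse of the ascending sort (Int values, identity key)
theorem sorted_rev_eq_reverse (score : List Int) :
    PySem.List.sorted score (fun x => x) true = (PySem.List.sorted score (fun x => x) false).reverse := by
  have h : (PySem.List.sorted score (fun x => x) true).reverse
      = PySem.List.sorted score (fun x => x) false := by
    apply PySem.List.eq_of_perm_of_pairwise_le_of_injective (fun x => x) (fun _ _ h => h)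
    · exact (List.reverse_perm _).trans ((PySem.List.sorted_perm score (fun x => x) true).trans
        (PySem.List.sorted_perm score (fun x => x) false).symm)
    · exact List.pairwise_reverse.mpr (PySem.List.sorted_pairwise_rev score (fun x => x))
    · exact PySem.List.sorted_pairwise score (fun x => x)
  rw [← h, List.reverse_reverse]

-- A's fold over the descending sort equals the sum of the minima of the full chunks,
-- written over the ASCENDING sort a (A's list is a.reverse)
theorem A_eq_sum (M : Nat) (a : List Int) (hMpos : 0 < M)
    (hmono : ∀ p q : Nat, p ≤ q → q < a.length → a.getD p 0 ≤ a.getD q 0) :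
    (PySem.List.pyRange 0 (PySem.List.len a.reverse) (M : Int)).foldl
      (fun answer i =>
        if PySem.List.len (PySem.List.slice a.reverse (some i) (some (i + (M : Int)))) = (M : Int) then
          answer + (PySem.List.min? (PySem.List.slice a.reverse (some i) (some (i + (M : Int)))) (fun x => x)).getD 0 * (M : Int)
        else answer) 0
    = ∑ x ∈ Finset.range (a.length / M), a.getD (a.length - (M * x + M)) 0 * (M : Int) := by
  have hm : (0 : Int) < (M : Int) := by exact_mod_cast hMpos
  set n := a.length with hn
  set q := n / M with hq
  have hnqr : q * M + n % M = n := by rw [Nat.mul_comm]; exact Nat.div_add_mod n M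
  have hrM : n % M < M := Nat.mod_lt _ hMpos
  have hslice : ∀ x : Nat, PySem.List.slice a.reverse (some ((0:Int) + (M:Int) * (x:Int))) (some ((0:Int) + (M:Int) * (x:Int) + (M:Int)))
      = (a.reverse.drop (M * x)).take M := by
    intro x
    have h2 : ((0:Int) + (M:Int) * (x:Int) + (M:Int)) = ((M * x + M : Nat) : Int) := by push_cast; ring
    have h1 : ((0:Int) + (M:Int) * (x:Int)) = ((M * x : Nat) : Int) := by push_cast; ring
    rw [h2, h1, PySem.List.slice_natCast]
    congr 1
    omega
  have hcond : ∀ x : Nat,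
      (PySem.List.len (PySem.List.slice a.reverse (some ((0:Int) + (M:Int) * (x:Int))) (some ((0:Int) + (M:Int) * (x:Int) + (M:Int)))) = (M : Int))
      ↔ M * x + M ≤ n := by
    intro x
    rw [hslice x, PySem.List.len_eq]
    simp only [List.length_take, List.length_drop, List.length_reverse, ← hn]
    constructor
    · intro h
      have : min M (n - M * x) = M := by exact_mod_cast h
      omega
    · intro h
      have : min M (n - M * x) = M := by omega
      rw [this]
  rw [PySem.List.len_eq, List.length_reverse, ← hn]
  rw [PySem.List.pyRange_of_pos 0 (n : Int) hm]
  rw [List.foldl_map]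
  rw [foldl_if_add (List.range _)
      (fun x : Nat => PySem.List.len (PySem.List.slice a.reverse (some ((0:Int) + (M:Int) * (x:Int))) (some ((0:Int) + (M:Int) * (x:Int) + (M:Int)))) = (M:Int)) _ 0]
  rw [zero_add, sum_map_range]
  have hcnt : (if (0:Int) < (n:Int) then (((n:Int) - 0 + (M:Int) - 1) / (M:Int)).toNat else 0) = (n + M - 1) / M := by
    split
    · rename_i hpos
      have he : ((n:Int) - 0 + (M:Int) - 1) = ((n + M - 1 : Nat) : Int) := by omega
      rw [he, ← Int.natCast_div, Int.toNat_natCast]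
    · rename_i hneg
      have hn0 : n = 0 := by omega
      rw [hn0]
      have : (0 + M - 1) / M = 0 := Nat.div_eq_of_lt (by omega)
      omega
  rw [hcnt]
  have hqcnt : q ≤ (n + M - 1) / M := by
    rw [Nat.le_div_iff_mul_le hMpos]
    omega
  have hsub : Finset.range q ⊆ Finset.range ((n + M - 1) / M) := by
    intro x hx; simp only [Finset.mem_range] at *; omega
  rw [← Finset.sum_subset hsub (by
    intro x hx hnx
    rw [if_neg]
    rw [hcond x]
    simp only [Finset.mem_range] at hx hnx
    have hxq : q ≤ x := by omega
    have h1 : M * q ≤ M * x := Nat.mul_le_mul_left M hxq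
    have h2 : M * q = q * M := Nat.mul_comm M q
    omega)]
  apply Finset.sum_congr rfl
  intro x hx
  have hxq : x < q := Finset.mem_range.mp hx
  have hfull : M * x + M ≤ n := by
    have h1 : M * (x+1) ≤ M * q := Nat.mul_le_mul_left M (by omega)
    have h2 : M * (x+1) = M * x + M := by ring
    have h3 : M * q = q * M := Nat.mul_comm M q
    omega
  rw [if_pos ((hcond x).mpr hfull), hslice x]
  rw [min_chunk a hmono (M*x) M hMpos (by omega)]

-- per-element walk over c copies of v from carry r < M: (r+c)/M boxes close, carry (r+c)%M
theorem perStep_replicate (M : Nat) (hM : 0 < M) (c : Nat) : ∀ (r : Nat), r < M → ∀ (t v : Int),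
    List.foldl (perStep (M : Int)) (t, (r : Int)) (List.replicate c v)
      = (t + (((r + c) / M : Nat) : Int) * (M : Int) * v, (((r + c) % M : Nat) : Int)) := by
  induction c with
  | zero =>
      intro r hr t v
      simp [Nat.div_eq_of_lt hr, Nat.mod_eq_of_lt hr]
  | succ c ih =>
      intro r hr t v
      rw [List.replicate_succ, List.foldl_cons]
      have hstep : perStep (M : Int) (t, (r : Int)) v
          = (t + (((r + 1) / M : Nat) : Int) * (M : Int) * v, (((r + 1) % M : Nat) : Int)) := by
        simp only [perStep]
        have h1 : ((r : Int) + 1) = ((r + 1 : Nat) : Int) := by push_cast; ring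
        rw [h1, PySem.Int.floordiv_natCast, PySem.Int.mod_natCast]
      rw [hstep, ih ((r+1) % M) (Nat.mod_lt _ hM)]
      have ha : (r + 1) % M + c + M * ((r+1)/M) = r + (c + 1) := by
        have := Nat.div_add_mod (r+1) M
        omega
      have hdiv : ((r+1) % M + c) / M + (r+1)/M = (r + (c+1)) / M := by
        rw [← ha, Nat.add_mul_div_left _ _ hM]
      have hmod : ((r+1) % M + c) % M = (r + (c+1)) % M := by
        rw [← ha, Nat.add_mul_mod_self_left]
      rw [Prod.ext_iff]
      constructor
      · simp only
        rw [← hdiv]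
        push_cast
        ring
      · simp only
        rw [hmod]

-- B's per-distinct-value fold IS the per-element walk over the expanded list
theorem bfold_eq_perStep (M : Nat) (hM : 0 < M) (cnt : Int → Nat) :
    ∀ (ks : List Int) (r : Nat), r < M → ∀ (t : Int),
    List.foldl (fun (st : Int × Int) v =>
        (st.1 + PySem.Int.floordiv ((cnt v : Int) + st.2) (M : Int) * (M : Int) * v,
         PySem.Int.mod ((cnt v : Int) + st.2) (M : Int))) (t, (r : Int)) ks
      = List.foldl (perStep (M : Int)) (t, (r : Int))
          (ks.flatMap (fun v => List.replicate (cnt v) v)) := by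
  intro ks
  induction ks with
  | nil => intro r hr t; simp
  | cons v ks ih =>
      intro r hr t
      rw [List.foldl_cons, List.flatMap_cons, List.foldl_append]
      rw [perStep_replicate M hM (cnt v) r hr t v]
      have hc : ((cnt v : Int) + (r : Int)) = ((r + cnt v : Nat) : Int) := by push_cast; ring
      simp only [hc, PySem.Int.floordiv_natCast, PySem.Int.mod_natCast]
      exact ih ((r + cnt v) % M) (Nat.mod_lt _ hM) _

-- a short tail (carry + length < M) closes no box
theorem perStep_short (M : Nat) (hM : 0 < M) : ∀ (l : List Int) (r : Nat) (t : Int),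
    r + l.length < M →
    List.foldl (perStep (M : Int)) (t, (r : Int)) l = (t, ((r + l.length : Nat) : Int)) := by
  intro l
  induction l with
  | nil => intro r t h; simp
  | cons a l ih =>
      intro r t h
      rw [List.foldl_cons]
      have hstep : perStep (M : Int) (t, (r : Int)) a = (t, ((r + 1 : Nat) : Int)) := by
        simp only [perStep]
        have h1 : ((r : Int) + 1) = ((r + 1 : Nat) : Int) := by push_cast; ring
        rw [h1, PySem.Int.floordiv_natCast, PySem.Int.mod_natCast]
        have hd : (r + 1) / M = 0 := Nat.div_eq_of_lt (by simp at h; omega)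
        have hm : (r + 1) % M = r + 1 := Nat.mod_eq_of_lt (by simp at h; omega)
        rw [hd, hm]
        simp
      rw [hstep, ih (r+1) t (by simp at h ⊢; omega)]
      congr 2
      simp
      try omega

-- a piece completing exactly one box (carry + length = M): total += M * last, carry 0
theorem perStep_full (M : Nat) (hM : 0 < M) : ∀ (l : List Int) (r : Nat) (t : Int),
    l ≠ [] → r + l.length = M →
    List.foldl (perStep (M : Int)) (t, (r : Int)) l
      = (t + (M : Int) * l.getD (l.length - 1) 0, (0 : Int)) := by
  intro l
  induction l with
  | nil => intro r t h _; exact absurd rfl h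
  | cons a l ih =>
      intro r t _ hlen
      rw [List.foldl_cons]
      cases l with
      | nil =>
          have hr : r + 1 = M := by simpa using hlen
          simp only [perStep]
          have h1 : ((r : Int) + 1) = ((r + 1 : Nat) : Int) := by push_cast; ring
          rw [h1, PySem.Int.floordiv_natCast, PySem.Int.mod_natCast, hr]
          simp [Nat.div_self hM, Nat.mod_self]
          try ring
      | cons b l' =>
          have hstep : perStep (M : Int) (t, (r : Int)) a = (t, ((r + 1 : Nat) : Int)) := by
            simp only [perStep]
            have h1 : ((r : Int) + 1) = ((r + 1 : Nat) : Int) := by push_cast; ring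
            rw [h1, PySem.Int.floordiv_natCast, PySem.Int.mod_natCast]
            have hlt : r + 1 < M := by simp at hlen; omega
            rw [Nat.div_eq_of_lt hlt, Nat.mod_eq_of_lt hlt]
            simp
          rw [hstep, ih (r+1) t (by simp) (by simp at hlen ⊢; omega)]
          congr 2

-- the per-element walk over any list from carry 0: one box per full chunk, min = chunk's last
theorem perStep_chunks (M : Nat) (hM : 0 < M) : ∀ (n : Nat) (l : List Int) (t : Int),
    l.length = n →
    List.foldl (perStep (M : Int)) (t, (0 : Int)) l
      = (t + (M : Int) * ∑ x ∈ Finset.range (l.length / M), l.getD (M * x + M - 1) 0,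
         ((l.length % M : Nat) : Int)) := by
  intro n
  induction n using Nat.strong_induction_on with
  | _ n ih =>
    intro l t hlen
    by_cases hlt : l.length < M
    · have hq : l.length / M = 0 := Nat.div_eq_of_lt hlt
      have hr : l.length % M = l.length := Nat.mod_eq_of_lt hlt
      have h0 : ((0 : Nat) : Int) = (0 : Int) := rfl
      rw [← h0, perStep_short M hM l 0 t (by omega), hq, hr]
      simp
    · push_neg at hlt
      have hsplit : List.foldl (perStep (M : Int)) (t, (0 : Int)) l
          = List.foldl (perStep (M : Int))
              (List.foldl (perStep (M : Int)) (t, (0 : Int)) (l.take M)) (l.drop M) := by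
        rw [← List.foldl_append, List.take_append_drop]
      have htlen : (l.take M).length = M := by simp; omega
      have hne : l.take M ≠ [] := by
        intro h; rw [h] at htlen; simp at htlen; omega
      have h0 : ((0 : Nat) : Int) = (0 : Int) := rfl
      have hfull := perStep_full M hM (l.take M) 0 t hne (by omega)
      rw [hsplit, ← h0, hfull]
      have hdlen : (l.drop M).length = l.length - M := by simp
      have hrec := ih (l.length - M) (by omega) (l.drop M)
        (t + (M : Int) * (l.take M).getD ((l.take M).length - 1) 0) (by omega)
      rw [hrec]
      have hq : l.length / M = (l.drop M).length / M + 1 := by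
        rw [hdlen, ← Nat.add_div_right _ hM]
        congr 1
        omega
      have hmods : (l.drop M).length % M = l.length % M := by
        rw [hdlen]
        conv_rhs => rw [← Nat.sub_add_cancel hlt]
        rw [Nat.add_mod_right]
      rw [Prod.ext_iff]
      refine ⟨?_, by simp only; rw [hmods]⟩
      simp only
      rw [hq, Finset.sum_range_succ']
      have hget0 : (l.take M).getD ((l.take M).length - 1) 0 = l.getD (M * 0 + M - 1) 0 := by
        rw [htlen]
        have hidx : M * 0 + M - 1 = M - 1 := by omega
        rw [hidx, List.getD_eq_getElem?_getD, List.getD_eq_getElem?_getD, List.getElem?_take]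
        rw [if_pos (by omega)]
      have hgets : ∀ x, (l.drop M).getD (M * x + M - 1) 0 = l.getD (M * (x + 1) + M - 1) 0 := by
        intro x
        have hx : M * (x + 1) = M * x + M := by ring
        have hidx2 : M * (x + 1) + M - 1 = M + (M * x + M - 1) := by rw [hx]; omega
        rw [List.getD_eq_getElem?_getD, List.getD_eq_getElem?_getD, hidx2, List.getElem?_drop]
      rw [hget0]
      simp only [hgets]
      push_cast
      ring

theorem sum_ite_count (ks : List Int) (w : Int) (C : Nat) :
    (ks.map (fun v => if v = w then C else 0)).sum = ks.count w * C := by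
  induction ks with
  | nil => simp
  | cons a ks ih =>
      rw [List.map_cons, List.sum_cons, ih, List.count_cons]
      by_cases h : a = w
      · simp [h]; ring
      · have h2 : (w == a) = false := by simpa [beq_iff_eq] using Ne.symm h
        simp [h, h2]

-- the ascending sort is the concatenation of count-many copies of each distinct value ascending
theorem asc_flat (score : List Int) :
    PySem.List.sorted score (fun x => x) false
      = (PySem.List.sorted (PySem.Set.ofList score) (fun x => x) false).flatMap
          (fun v => List.replicate (score.count v) v) := by
  set ks := PySem.List.sorted (PySem.Set.ofList score) (fun x => x) false with hks
  have hperm_ks : ks.Perm (PySem.Set.ofList score) := PySem.List.sorted_perm _ _ _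
  have hnd : ks.Nodup := hperm_ks.nodup_iff.mpr (PySem.Set.nodup_ofList score)
  have hmem : ∀ w : Int, w ∈ ks ↔ w ∈ score := by
    intro w
    rw [hperm_ks.mem_iff, PySem.Set.mem_ofList]
  -- counts agree
  have hcount : ∀ w : Int, (ks.flatMap (fun v => List.replicate (score.count v) v)).count w
      = score.count w := by
    intro w
    rw [List.flatMap, List.count_flatten, List.map_map]
    have hmapeq : (List.count w ∘ fun v => List.replicate (score.count v) v)
        = fun v => if v = w then score.count w else 0 := by
      funext v
      simp only [Function.comp]
      rw [List.count_replicate]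
      by_cases h : v = w
      · simp [h]
      · have h2 : ¬ (v == w) := by simpa using h
        simp [h, h2]
    rw [hmapeq, sum_ite_count]
    by_cases h : w ∈ score
    · rw [List.count_eq_one_of_mem hnd ((hmem w).mpr h), one_mul]
    · rw [List.count_eq_zero_of_not_mem (fun hc => h ((hmem w).mp hc)),
          List.count_eq_zero_of_not_mem h]
  apply PySem.List.eq_of_perm_of_pairwise_le_of_injective (fun x => x) (fun _ _ h => h)
  · refine (PySem.List.sorted_perm _ _ _).trans (List.perm_iff_count.mpr ?_).symm
    intro w
    rw [hcount w]
  · exact PySem.List.sorted_pairwise _ _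
  · -- pairwise ≤ on the flattened list
    rw [List.flatMap]
    rw [List.pairwise_flatten]
    constructor
    · intro l hl
      simp only [List.mem_map] at hl
      obtain ⟨v, _, rfl⟩ := hl
      exact List.pairwise_replicate.mpr (Or.inr le_rfl)
    · have hlt : ks.Pairwise (· < ·) := by
        have h1 : ks.Pairwise (· ≤ ·) := PySem.List.sorted_pairwise _ _
        have h2 : ks.Pairwise (· ≠ ·) := hnd
        exact (h1.and h2).imp (fun h => lt_of_le_of_ne h.1 h.2)
      refine List.Pairwise.map _ ?_ hlt
      intro a b hab x hx y hy
      rw [List.eq_of_mem_replicate hx, List.eq_of_mem_replicate hy]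
      exact le_of_lt hab

-- ===== VERDICT (by name: the statement is the Claim_ definition above) =====
theorem solution_spec : Claim_equal_solution := by
  intro k m score _ hpre
  unfold Pre_solution at hpre
  unfold Spec_solution solution solution_alt
  dsimp only
  by_cases hm : m ≤ 0
  · rw [if_pos hm]
    rw [PySem.List.len_eq]
    rw [pyRange_neg_step_nil _ _ (by positivity) (by omega)]
    rfl
  · have hm' : 0 < m := by omega
    rw [if_neg (by omega)]
    rw [sorted_rev_eq_reverse score]
    lift m to Nat using hm'.le with M
    have hMpos : 0 < M := by exact_mod_cast hm'
    set a := PySem.List.sorted score (fun x => x) false with ha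
    have hmono : ∀ p q : Nat, p ≤ q → q < a.length → a.getD p 0 ≤ a.getD q 0 := by
      intro p q hpq hq
      rw [List.getD_eq_getElem _ 0 (by omega), List.getD_eq_getElem _ 0 hq]
      exact PySem.List.sorted_id_getElem_mono score hpq hq
    rw [A_eq_sum M a hMpos hmono]
    -- B side
    rw [PySem.Dict.foldl_insert_getD_add_one_eq_counter]
    simp only [PySem.Dict.keys_counter, PySem.Dict.getD_counter]
    rw [sorted_rev_eq_reverse (PySem.Set.ofList score)]
    have h0 : ((0 : Nat) : Int) = (0 : Int) := rfl
    rw [← h0, bfold_eq_perStep M hMpos (fun v => score.count v) _ 0 hMpos]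
    have hflat : (PySem.List.sorted (PySem.Set.ofList score) (fun x => x) false).reverse.flatMap
        (fun v => List.replicate (score.count v) v) = a.reverse := by
      rw [ha, asc_flat score, List.reverse_flatMap]
      simp [Function.comp_def]
    rw [hflat, h0, perStep_chunks M hMpos a.reverse.length a.reverse 0 rfl]
    simp only [List.length_reverse]
    rw [zero_add, Finset.mul_sum]
    apply Finset.sum_congr rfl
    intro x hx
    have hxq : x < a.length / M := Finset.mem_range.mp hx
    have hfull : M * x + M ≤ a.length := by
      have h1 : M * (x + 1) ≤ M * (a.length / M) := Nat.mul_le_mul_left M (by omega)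
      have h2 : M * (x + 1) = M * x + M := by ring
      have h3 : M * (a.length / M) ≤ a.length := Nat.mul_div_le a.length M
      omega
    have hrev : a.reverse.getD (M * x + M - 1) 0 = a.getD (a.length - (M * x + M)) 0 := by
      rw [List.getD_eq_getElem _ 0 (by simp; omega), List.getD_eq_getElem _ 0 (by omega)]
      rw [List.getElem_reverse]
      congr 1
      omega
    rw [hrev]
    ring

@[simp] theorem solution_raises : Claim_raises_solution := by
  unfold Claim_raises_solution
  exact ⟨by intro k m score _ h; unfold Pre_solution; unfold Raises_solution at h; omega, by decide⟩
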